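-- pv_equiv track=rewrite | github.com/mistrzegiptu/WDI | zestaw2/zad12.py | digitEqualLength
-- ===== SOURCE A (Python) =====
-- def digitEqualLength(n):
--     n1 = n
--     length = 0
--
--     while n > 0:
--         n = n // 10
--         length += 1
--
--     n = n1
--     while n > 0:
--         if n % 10 == length:
--             return True
--         n = n//10
--
--     return False
-- ===== SOURCE B (Python) =====
-- def digitEqualLength(n):
--     seen = set()
--     length = 0
--     while n > 0:
--         seen.add(n % 10)
--         n //= 10
--         length += 1
--     return length in seen
-- ===== Notes on version B (the rewrite author's own statement) =====
-- stated objective: alternative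
-- what changed: Fuses A's two staged digit-peeling loops (one to count, one to rescan with an early return) into a single pass that accumulates the set of digits while counting, finishing with one membership test 'length in seen'.
import Mathlib
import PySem

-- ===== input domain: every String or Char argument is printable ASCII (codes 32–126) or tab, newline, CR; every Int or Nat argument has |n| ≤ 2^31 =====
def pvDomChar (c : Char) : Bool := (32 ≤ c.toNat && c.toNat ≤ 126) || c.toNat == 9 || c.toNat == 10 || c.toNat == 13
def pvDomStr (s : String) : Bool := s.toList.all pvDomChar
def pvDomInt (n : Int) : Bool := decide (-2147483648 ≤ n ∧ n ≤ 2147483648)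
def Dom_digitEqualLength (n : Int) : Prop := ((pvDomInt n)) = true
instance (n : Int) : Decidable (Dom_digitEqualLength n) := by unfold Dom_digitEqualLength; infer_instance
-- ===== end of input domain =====

-- B fuses A's two digit-peeling loops (count, then rescan with early return) into ONE pass
-- that collects the set of digits while counting, ending with a single membership test (alternative; same cost).

-- ===== PORT A =====
-- first while-loop: count the digits of n by repeated floor division
def pvLoop1 (n : Int) (length : Int) : Int :=
  if h : 0 < n then pvLoop1 (PySem.Int.floordiv n 10) (length + 1) else length
  termination_by n.toNat
  decreasing_by simp [PySem.Int.floordiv, Int.fdiv_eq_ediv]; omega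

-- second while-loop: peel digits, early-return True when one equals `length`
def pvLoop2 (n : Int) (length : Int) : Bool :=
  if h : 0 < n then
    if PySem.Int.mod n 10 = length then true
    else pvLoop2 (PySem.Int.floordiv n 10) length
  else false
  termination_by n.toNat
  decreasing_by simp [PySem.Int.floordiv, Int.fdiv_eq_ediv]; omega

def digitEqualLength (n : Int) : Bool :=
  pvLoop2 n (pvLoop1 n 0)

-- ===== PORT B =====
-- the single while-loop of Source B: seen.add(n % 10); n //= 10; length += 1
def pvLoopB (n : Int) (seen : PySem.Set Int) (length : Int) : PySem.Set Int × Int :=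
  if h : 0 < n then
    pvLoopB (PySem.Int.floordiv n 10) (PySem.Set.add seen (PySem.Int.mod n 10)) (length + 1)
  else (seen, length)
  termination_by n.toNat
  decreasing_by simp [PySem.Int.floordiv, Int.fdiv_eq_ediv]; omega

def digitEqualLength_alt (n : Int) : Bool :=
  PySem.Set.contains (pvLoopB n PySem.Set.empty 0).1 (pvLoopB n PySem.Set.empty 0).2   -- length in seen

-- ===== PRECONDITION & SPEC =====
def Spec_digitEqualLength (n : Int) (out : Bool) : Prop := out = digitEqualLength_alt n
instance (n : Int) (out : Bool) : Decidable (Spec_digitEqualLength n out) := by unfold Spec_digitEqualLength; infer_instance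

-- ===== CLAIM (what is proved, stated in full; the proofs are below) =====
def Claim_equal_digitEqualLength : Prop := ∀ (n : Int), Dom_digitEqualLength n → Spec_digitEqualLength n (digitEqualLength n)

-- ===== LEMMAS AND PROOFS =====

theorem pv_contains_add (s : PySem.Set Int) (x y : Int) :
    PySem.Set.contains (PySem.Set.add s x) y = (PySem.Set.contains s y || y == x) := by
  simp [PySem.Set.add, PySem.Set.contains]
  by_cases hx : x ∈ s
  · by_cases he : y = x
    · simp [hx, he]
    · simp [hx, he]
  · simp [hx]
    by_cases he : y = x <;> simp [he]

-- the second component of B's loop is A's first loop (the digit count)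
theorem pv_loopB_snd (n : Int) (seen : PySem.Set Int) (length : Int) :
    (pvLoopB n seen length).2 = pvLoop1 n length := by
  induction n, seen, length using pvLoopB.induct with
  | case1 n seen length h ih =>
      rw [pvLoopB, dif_pos h, ih]
      conv_rhs => rw [pvLoop1]
      rw [dif_pos h]
  | case2 n seen length h =>
      rw [pvLoopB, dif_neg h, pvLoop1, dif_neg h]

-- membership in B's accumulated digit set is A's second loop (plus the initial set)
theorem pv_loopB_contains (L : Int) (n : Int) (seen : PySem.Set Int) (length : Int) :
    PySem.Set.contains (pvLoopB n seen length).1 L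
      = (pvLoop2 n L || PySem.Set.contains seen L) := by
  induction n, seen, length using pvLoopB.induct with
  | case1 n seen length h ih =>
      rw [pvLoopB, dif_pos h, ih]
      conv_rhs => rw [pvLoop2]
      rw [dif_pos h, pv_contains_add]
      have hmod : PySem.Int.mod n 10 = n % 10 := by
        simp [PySem.Int.mod, Int.fmod_eq_emod]
      rw [hmod]
      by_cases he : n % 10 = L
      · rw [if_pos he, he]
        simp
      · rw [if_neg he]
        have hf : (L == n % 10) = false := by simp; omega
        rw [hf]
        simp
  | case2 n seen length h =>
      rw [pvLoopB, dif_neg h, pvLoop2, dif_neg h]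
      simp

-- ===== VERDICT (by name: the statement is the Claim_ definition above) =====
theorem digitEqualLength_spec : Claim_equal_digitEqualLength := by
  intro n _
  unfold Spec_digitEqualLength digitEqualLength digitEqualLength_alt
  rw [pv_loopB_snd, pv_loopB_contains]
  simp [PySem.Set.empty, PySem.Set.contains]
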